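-- pv_equiv track=rewrite | github.com/changyuanhua/fpgrowth | apriori.py | caculate_l2
-- ===== SOURCE A (Python) =====
-- from collections import defaultdict
--
-- def caculate_l2(all_items,items_dict,l_list,min_):
--     end = 0
--     element_dict = defaultdict(lambda: 0)
--     delete_list = []
--     for it in l_list:
--         it_list = []
--         for i in it:
--             it_list.append(i)
--         it_set = set(it_list)
--         num = 0
--         for items in all_items:
--             set_items = set(items)
--             if it_set.issubset(set_items):
--                 num += 1
--         if num >= min_:
--              element_dict[it] = num
--         else:
--            delete_list.append(it_list)
--     if len(element_dict.keys())==0: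
--         end = 1
--         element_dict = items_dict
--     return element_dict, delete_list, end
-- ===== SOURCE B (Python) =====
-- from collections import defaultdict
--
-- def caculate_l2(all_items, items_dict, l_list, min_):
--     # inverted index: item -> set of transaction ids
--     postings = defaultdict(set)
--     for tid, items in enumerate(all_items):
--         for i in items:
--             postings[i].add(tid)
--     element_dict = {}
--     delete_list = []
--     for it in l_list:
--         it_list = list(it)
--         if it_list:
--             txs = postings[it_list[0]]
--             for i in it_list[1:]:
--                 txs = txs & postings[i]
--             num = len(txs)
--         else:
--             num = len(all_items)
--         if num >= min_:
--             element_dict[tuple(it)] = num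
--         else:
--             delete_list.append(it_list)
--     if len(element_dict) == 0:
--         return items_dict, delete_list, 1
--     return element_dict, delete_list, 0
-- ===== Notes on version B (the rewrite author's own statement) =====
-- stated objective: faster
-- what changed: B builds an inverted index (item -> set of transaction ids) once and computes each candidate's support by intersecting posting sets, instead of A's rescan of every transaction (with a fresh set() per transaction) for every candidate.
import Mathlib
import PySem

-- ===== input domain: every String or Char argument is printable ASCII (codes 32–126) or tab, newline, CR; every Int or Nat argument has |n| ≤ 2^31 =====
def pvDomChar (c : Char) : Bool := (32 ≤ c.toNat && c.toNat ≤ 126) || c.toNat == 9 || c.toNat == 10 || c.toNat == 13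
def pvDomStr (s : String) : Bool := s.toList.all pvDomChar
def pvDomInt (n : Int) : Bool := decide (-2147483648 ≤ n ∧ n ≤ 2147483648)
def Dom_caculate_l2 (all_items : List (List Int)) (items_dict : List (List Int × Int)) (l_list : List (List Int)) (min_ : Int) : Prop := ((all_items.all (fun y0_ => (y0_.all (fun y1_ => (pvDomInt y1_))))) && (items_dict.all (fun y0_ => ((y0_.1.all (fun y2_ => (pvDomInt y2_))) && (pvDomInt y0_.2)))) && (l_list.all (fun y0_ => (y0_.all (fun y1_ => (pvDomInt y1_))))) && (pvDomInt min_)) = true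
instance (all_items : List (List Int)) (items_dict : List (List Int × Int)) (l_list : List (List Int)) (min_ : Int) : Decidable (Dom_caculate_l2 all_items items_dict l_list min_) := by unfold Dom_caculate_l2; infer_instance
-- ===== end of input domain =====

-- B replaces A's quadratic "rescan every transaction per candidate" by an inverted index
-- item -> set of transaction ids built once, intersecting posting sets per candidate ("alternative" objective).

-- ===== PORT A =====
def caculate_l2 (all_items : List (List Int)) (items_dict : List (List Int × Int)) (l_list : List (List Int)) (min_ : Int) : (List (List Int × Int)) × List (List Int) × Int :=
  let r := l_list.foldl (fun (st : PySem.Dict (List Int) Int × List (List Int)) it =>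
    let it_list := it.foldl (fun acc i => acc ++ [i]) ([] : List Int)
    let it_set : PySem.Set Int := PySem.Set.ofList it_list
    let num : Int := all_items.foldl (fun num items =>
      let set_items : PySem.Set Int := PySem.Set.ofList items
      if PySem.Set.issubset it_set set_items then num + 1 else num) 0
    if num ≥ min_ then
      (st.1.insert it num, st.2)  -- 'element_dict[it] = num' (itemsets are hashable tuples)
    else
      (st.1, st.2 ++ [it_list]))
    (PySem.Dict.empty, ([] : List (List Int)))
  if r.1.keys.length = 0 then (items_dict, r.2, 1) else (r.1.items, r.2, 0)

-- ===== PORT B =====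
-- inverted index: item -> set of transaction ids (defaultdict(set); lookup of a missing item = empty set)
def pvPostings (all_items : List (List Int)) : PySem.Dict Int (PySem.Set Int) :=
  (PySem.List.enumerate all_items).foldl
    (fun d p => p.2.foldl (fun d i => d.modify i PySem.Set.empty (fun s => PySem.Set.add s p.1)) d)
    PySem.Dict.empty

def caculate_l2_alt (all_items : List (List Int)) (items_dict : List (List Int × Int)) (l_list : List (List Int)) (min_ : Int) : (List (List Int × Int)) × List (List Int) × Int :=
  let postings := pvPostings all_items
  let r := l_list.foldl (fun (st : PySem.Dict (List Int) Int × List (List Int)) it =>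
    let it_list := it   -- 'list(it)': a fresh copy in Python, the same list value here
    let num : Int :=
      match it_list with
      | [] => (all_items.length : Int)
      | h :: tl =>
        let txs := tl.foldl (fun s i => PySem.Set.inter s (postings.getD i PySem.Set.empty))
                            (postings.getD h PySem.Set.empty)
        PySem.Set.len txs
    if num ≥ min_ then (st.1.insert it num, st.2)  -- 'element_dict[tuple(it)] = num'
    else (st.1, st.2 ++ [it_list]))
    (PySem.Dict.empty, ([] : List (List Int)))
  if r.1.size = 0 then (items_dict, r.2, 1) else (r.1.items, r.2, 0)

-- ===== PRECONDITION & SPEC =====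
def Spec_caculate_l2 (all_items : List (List Int)) (items_dict : List (List Int × Int)) (l_list : List (List Int)) (min_ : Int) (out : (List (List Int × Int)) × List (List Int) × Int) : Prop := out = caculate_l2_alt all_items items_dict l_list min_
instance (all_items : List (List Int)) (items_dict : List (List Int × Int)) (l_list : List (List Int)) (min_ : Int) (out : (List (List Int × Int)) × List (List Int) × Int) : Decidable (Spec_caculate_l2 all_items items_dict l_list min_ out) := by unfold Spec_caculate_l2; infer_instance

-- ===== CLAIM (what is proved, stated in full; the proofs are below) =====
def Claim_equal_caculate_l2 : Prop := ∀ (all_items : List (List Int)) (items_dict : List (List Int × Int)) (l_list : List (List Int)) (min_ : Int), Dom_caculate_l2 all_items items_dict l_list min_ → Spec_caculate_l2 all_items items_dict l_list min_ (caculate_l2 all_items items_dict l_list min_)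

-- ===== LEMMAS AND PROOFS =====

-- the inner defaultdict(set) loop of one transaction: what it adds to each posting list
lemma pv_inner_mem (items : List Int) (d : PySem.Dict Int (PySem.Set Int)) (tid i t : Int) :
    t ∈ (items.foldl (fun d j => d.modify j PySem.Set.empty (fun s => PySem.Set.add s tid)) d).getD i PySem.Set.empty ↔
      t ∈ d.getD i PySem.Set.empty ∨ (i ∈ items ∧ t = tid) := by
  induction items generalizing d with
  | nil => simp
  | cons x xs ih =>
    simp only [List.foldl_cons, ih, PySem.Dict.getD_modify]
    by_cases hx : i = x
    · subst hx; simp only [if_true, PySem.Set.mem_add, List.mem_cons]; tauto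
    · simp [hx]

lemma pv_inner_nodup (items : List Int) (d : PySem.Dict Int (PySem.Set Int)) (tid : Int)
    (h : ∀ i, (d.getD i PySem.Set.empty).Nodup) (i : Int) :
    ((items.foldl (fun d j => d.modify j PySem.Set.empty (fun s => PySem.Set.add s tid)) d).getD i PySem.Set.empty).Nodup := by
  induction items generalizing d with
  | nil => exact h i
  | cons x xs ih =>
    refine ih _ (fun j => ?_)
    rw [PySem.Dict.getD_modify]
    split_ifs with hj
    · exact PySem.Set.nodup_add _ _ (h x)
    · exact h j

lemma pv_build_nodup (ps : List (Int × List Int)) (d : PySem.Dict Int (PySem.Set Int))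
    (h : ∀ i, (d.getD i PySem.Set.empty).Nodup) (i : Int) :
    ((ps.foldl (fun d p => p.2.foldl (fun d j => d.modify j PySem.Set.empty (fun s => PySem.Set.add s p.1)) d) d).getD i PySem.Set.empty).Nodup := by
  induction ps generalizing d with
  | nil => exact h i
  | cons q qs ih => exact ih _ (fun j => pv_inner_nodup _ _ _ h j)

lemma pv_postings_nodup (all_items : List (List Int)) (i : Int) :
    ((pvPostings all_items).getD i PySem.Set.empty).Nodup := by
  exact pv_build_nodup _ _ (fun j => by simp [PySem.Set.empty]) i

-- the inverted index is correct: tid ∈ postings[i] ↔ tid indexes a transaction containing i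
lemma pv_postings_mem (all_items : List (List Int)) (i t : Int) :
    t ∈ (pvPostings all_items).getD i PySem.Set.empty ↔
      ∃ k : Nat, k < all_items.length ∧ t = (k : Int) ∧ i ∈ all_items.getD k [] := by
  induction all_items using List.reverseRecOn with
  | nil => simp [pvPostings]
  | append_singleton xs x ih =>
    unfold pvPostings at *
    rw [PySem.List.enumerate_append, List.foldl_append]
    simp only [PySem.List.enumerate_cons, PySem.List.enumerate_nil, List.foldl_cons, List.foldl_nil]
    rw [pv_inner_mem, ih]
    constructor
    · rintro (⟨k, hk, ht, hi⟩ | ⟨hi, ht⟩)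
      · exact ⟨k, by simp; omega, ht, by rw [List.getD_append _ _ _ _ hk]; exact hi⟩
      · refine ⟨xs.length, by simp, by simpa using ht, ?_⟩
        simp only [List.getD, List.getElem?_append_right (le_refl xs.length)]
        simpa using hi
    · rintro ⟨k, hk, ht, hi⟩
      simp only [List.length_append, List.length_cons, List.length_nil] at hk
      by_cases hlt : k < xs.length
      · exact Or.inl ⟨k, hlt, ht, by rwa [List.getD_append _ _ _ _ hlt] at hi⟩
      · have hkeq : k = xs.length := by omega
        subst hkeq
        refine Or.inr ⟨?_, by simpa using ht⟩
        simp only [List.getD, List.getElem?_append_right (le_refl xs.length)] at hi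
        simpa using hi

-- the posting-set intersection loop
lemma pv_interfold_mem (tl : List Int) (g : Int → PySem.Set Int) (s0 : PySem.Set Int) (t : Int) :
    t ∈ tl.foldl (fun s i => PySem.Set.inter s (g i)) s0 ↔ t ∈ s0 ∧ ∀ i ∈ tl, t ∈ g i := by
  induction tl generalizing s0 with
  | nil => simp
  | cons x xs ih => simp [ih, PySem.Set.mem_inter]; tauto

lemma pv_interfold_nodup (tl : List Int) (g : Int → PySem.Set Int) (s0 : PySem.Set Int) (h : s0.Nodup) :
    (tl.foldl (fun s i => PySem.Set.inter s (g i)) s0).Nodup := by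
  induction tl generalizing s0 with
  | nil => exact h
  | cons x xs ih => exact ih _ (PySem.Set.nodup_inter _ _ h)

-- a countP over a list as a filter over its index range
lemma pv_countP_range (xs : List (List Int)) (p : List Int → Bool) :
    xs.countP p = ((List.range xs.length).filter (fun k => p (xs.getD k []))).length := by
  induction xs using List.reverseRecOn with
  | nil => simp
  | append_singleton ys y ih =>
    rw [List.countP_append, List.length_append, List.length_cons, List.length_nil,
        List.range_succ, List.filter_append, List.length_append]
    have hpred : ∀ k ∈ List.range ys.length,
        (p ((ys ++ [y]).getD k []) = p (ys.getD k [])) := by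
      intro k hk
      rw [List.mem_range] at hk
      rw [List.getD_append _ _ _ _ hk]
    rw [List.filter_congr hpred, ← ih]
    have hy : (ys ++ [y]).getD ys.length [] = y := by
      simp only [List.getD, List.getElem?_append_right (le_refl ys.length)]
      simp
    rw [List.countP_cons, add_left_cancel_iff]
    simp only [List.filter_cons, List.filter_nil, hy]
    cases hp : p y <;> simp

-- B's per-candidate support equals A's rescan count
lemma pv_num_eq (all_items : List (List Int)) (it : List Int) :
    (match it with
      | [] => (all_items.length : Int)
      | h :: tl =>
        PySem.Set.len (tl.foldl (fun s i => PySem.Set.inter s ((pvPostings all_items).getD i PySem.Set.empty))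
                            ((pvPostings all_items).getD h PySem.Set.empty)))
    = (all_items.countP (fun items => it.all (fun i => items.contains i)) : Int) := by
  cases it with
  | nil => simp [List.countP_true]
  | cons h tl =>
    simp only []
    have hSnodup : (tl.foldl (fun s i => PySem.Set.inter s ((pvPostings all_items).getD i PySem.Set.empty))
        ((pvPostings all_items).getD h PySem.Set.empty)).Nodup :=
      pv_interfold_nodup _ _ _ (pv_postings_nodup all_items h)
    have hFnodup : (((List.range all_items.length).filter
        (fun k => (h :: tl).all (fun i => (all_items.getD k []).contains i))).map
          (fun k : Nat => (k : Int))).Nodup := by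
      apply List.Nodup.map
      · exact fun a b hab => Nat.cast_injective hab
      · exact List.Nodup.filter _ List.nodup_range
    have hmem : ∀ t : Int,
        t ∈ tl.foldl (fun s i => PySem.Set.inter s ((pvPostings all_items).getD i PySem.Set.empty))
              ((pvPostings all_items).getD h PySem.Set.empty) ↔
        t ∈ ((List.range all_items.length).filter
              (fun k => (h :: tl).all (fun i => (all_items.getD k []).contains i))).map
            (fun k : Nat => (k : Int)) := by
      intro t
      rw [pv_interfold_mem]
      simp only [List.mem_map, List.mem_filter, List.mem_range]
      constructor
      · rintro ⟨hth, hall⟩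
        obtain ⟨k, hk, ht, hmemh⟩ := (pv_postings_mem all_items h t).1 hth
        refine ⟨k, ⟨hk, ?_⟩, ht.symm⟩
        rw [List.all_eq_true]
        intro i hi
        rcases List.mem_cons.1 hi with rfl | hi'
        · simpa using hmemh
        · obtain ⟨k', hk', ht', hm'⟩ := (pv_postings_mem all_items i t).1 (hall i hi')
          have hkk : k' = k := by
            have : ((k' : Int)) = (k : Int) := by rw [← ht', ← ht]
            exact_mod_cast this
          subst hkk
          simpa using hm'
      · rintro ⟨k, ⟨hk, hpk⟩, ht⟩
        rw [List.all_eq_true] at hpk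
        have hg : ∀ i ∈ h :: tl, t ∈ (pvPostings all_items).getD i PySem.Set.empty := by
          intro i hi
          exact (pv_postings_mem all_items i t).2 ⟨k, hk, ht.symm, by simpa using hpk i hi⟩
        exact ⟨hg h List.mem_cons_self, fun i hi => hg i (List.mem_cons_of_mem _ hi)⟩
    have hperm := (List.perm_ext_iff_of_nodup hSnodup hFnodup).2 hmem
    have hlen := hperm.length_eq
    rw [List.length_map] at hlen
    have hlS : PySem.Set.len (tl.foldl (fun s i => PySem.Set.inter s ((pvPostings all_items).getD i PySem.Set.empty))
        ((pvPostings all_items).getD h PySem.Set.empty)) = ((tl.foldl (fun s i => PySem.Set.inter s ((pvPostings all_items).getD i PySem.Set.empty))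
        ((pvPostings all_items).getD h PySem.Set.empty)).length : Int) := rfl
    rw [hlS, hlen, pv_countP_range all_items (fun items => (h :: tl).all (fun i => items.contains i))]

-- A's per-candidate rescan loop is a countP
lemma pv_numA_eq (all_items : List (List Int)) (it : List Int) :
    all_items.foldl (fun num items =>
        if PySem.Set.issubset (PySem.Set.ofList it) (PySem.Set.ofList items) then num + 1 else num) (0 : Int)
    = (all_items.countP (fun items => it.all (fun i => items.contains i)) : Int) := by
  rw [PySem.List.foldl_count_if, zero_add]
  congr 1
  apply List.countP_congr
  intro items _
  rw [Bool.eq_iff_iff]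
  simp only [PySem.Set.issubset_iff, PySem.Set.mem_ofList, List.all_eq_true, List.contains_iff_mem]
  tauto

-- the two folds over l_list coincide
lemma pv_main (all_items : List (List Int)) (items_dict : List (List Int × Int)) (l_list : List (List Int)) (min_ : Int) :
    caculate_l2 all_items items_dict l_list min_ = caculate_l2_alt all_items items_dict l_list min_ := by
  unfold caculate_l2 caculate_l2_alt
  have hfold : ∀ (st : PySem.Dict (List Int) Int × List (List Int)) (it : List Int),
      (let it_list := it.foldl (fun acc i => acc ++ [i]) ([] : List Int)
       let it_set : PySem.Set Int := PySem.Set.ofList it_list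
       let num : Int := all_items.foldl (fun num items =>
         let set_items : PySem.Set Int := PySem.Set.ofList items
         if PySem.Set.issubset it_set set_items then num + 1 else num) 0
       if num ≥ min_ then (st.1.insert it num, st.2) else (st.1, st.2 ++ [it_list]))
      = (let it_list := it
         let num : Int :=
           match it_list with
           | [] => (all_items.length : Int)
           | h :: tl =>
             let txs := tl.foldl (fun s i => PySem.Set.inter s ((pvPostings all_items).getD i PySem.Set.empty))
                                 ((pvPostings all_items).getD h PySem.Set.empty)
             PySem.Set.len txs
         if num ≥ min_ then (st.1.insert it num, st.2) else (st.1, st.2 ++ [it_list])) := by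
    intro st it
    simp only [PySem.List.foldl_append_singleton, List.nil_append]
    rw [pv_numA_eq all_items it, ← pv_num_eq all_items it]
  rw [PySem.List.foldl_congr_mem _ _ _ _ (fun st it _ => hfold st it)]
  simp only [PySem.Dict.keys, PySem.Dict.size, List.length_map]

-- ===== VERDICT (by name: the statement is the Claim_ definition above) =====
theorem caculate_l2_spec : Claim_equal_caculate_l2 := by
  intro all_items items_dict l_list min_ _
  unfold Spec_caculate_l2
  exact pv_main all_items items_dict l_list min_
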